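-- pv_equiv track=rewrite | github.com/KrishanSritharar2000/Digit-Spatial-Diffusion | mnist_dataset_gen.py | calculate_displacement
-- ===== SOURCE A (Python) =====
-- def calculate_displacement(relationships):
--     displacement = [0, 0]
--     for relationship in relationships:
--         if relationship == 'left':
--             displacement[0] -= 1
--         elif relationship == 'right':
--             displacement[0] += 1
--         elif relationship == 'above':
--             displacement[1] -= 1
--         elif relationship == 'below':
--             displacement[1] += 1
--     return displacement
-- ===== SOURCE B (Python) =====
-- def calculate_displacement(relationships):
--     def net(pos, neg):
--         return relationships.count(pos) - relationships.count(neg)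
--     return [net('right', 'left'), net('below', 'above')]
-- ===== Notes on version B (the rewrite author's own statement) =====
-- stated objective: simpler
-- what changed: Replaced the single accumulator pass with a per-element if/elif chain by staged whole-list count() scans: each vector component is computed independently as a difference of two counts, with no accumulator and no branching.
import Mathlib
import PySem

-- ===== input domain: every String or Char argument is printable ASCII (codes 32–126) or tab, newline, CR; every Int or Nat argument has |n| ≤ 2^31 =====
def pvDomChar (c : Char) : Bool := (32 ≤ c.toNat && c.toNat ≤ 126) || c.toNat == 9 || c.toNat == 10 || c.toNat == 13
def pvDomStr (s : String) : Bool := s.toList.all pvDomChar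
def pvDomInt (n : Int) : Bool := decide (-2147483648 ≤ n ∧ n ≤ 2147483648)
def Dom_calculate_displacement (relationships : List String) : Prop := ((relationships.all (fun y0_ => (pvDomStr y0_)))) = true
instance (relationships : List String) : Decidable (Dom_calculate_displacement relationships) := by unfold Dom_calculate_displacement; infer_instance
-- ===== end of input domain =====

-- B replaces A's single branching accumulator pass by staged whole-list count scans, one difference of counts per component (simpler; same cost).

-- ===== PORT A =====
-- A keeps a mutable pair [d0, d1] and branches on each string; ported as a foldl over the pair state.
def calculate_displacement (relationships : List String) : List Int :=
  let d := relationships.foldl (fun (d : Int × Int) relationship =>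
    if relationship == "left" then (d.1 - 1, d.2)
    else if relationship == "right" then (d.1 + 1, d.2)
    else if relationship == "above" then (d.1, d.2 - 1)
    else if relationship == "below" then (d.1, d.2 + 1)
    else d) (0, 0)
  [d.1, d.2]

-- ===== PORT B =====
-- B computes each component as a difference of two list.count scans via a helper, no accumulator and no branching.
def calc_disp_net (relationships : List String) (pos neg : String) : Int :=
  (PySem.List.count relationships pos) - (PySem.List.count relationships neg)

def calculate_displacement_alt (relationships : List String) : List Int :=
  [calc_disp_net relationships "right" "left", calc_disp_net relationships "below" "above"]

-- ===== PRECONDITION & SPEC =====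
def Spec_calculate_displacement (relationships : List String) (out : List Int) : Prop := out = calculate_displacement_alt relationships
instance (relationships : List String) (out : List Int) : Decidable (Spec_calculate_displacement relationships out) := by unfold Spec_calculate_displacement; infer_instance

-- ===== CLAIM (what is proved, stated in full; the proofs are below) =====
def Claim_equal_calculate_displacement : Prop := ∀ (relationships : List String), Dom_calculate_displacement relationships → Spec_calculate_displacement relationships (calculate_displacement relationships)

-- ===== LEMMAS AND PROOFS =====
theorem calc_disp_foldl (relationships : List String) (a b : Int) :
    relationships.foldl (fun (d : Int × Int) relationship =>
      if relationship == "left" then (d.1 - 1, d.2)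
      else if relationship == "right" then (d.1 + 1, d.2)
      else if relationship == "above" then (d.1, d.2 - 1)
      else if relationship == "below" then (d.1, d.2 + 1)
      else d) (a, b)
    = (a + (relationships.count "right" : Int) - (relationships.count "left" : Int),
       b + (relationships.count "below" : Int) - (relationships.count "above" : Int)) := by
  induction relationships generalizing a b with
  | nil => simp
  | cons x xs ih =>
    simp only [List.foldl_cons]
    split_ifs with h1 h2 h3 h4 <;>
      simp_all [Prod.ext_iff] <;> omega

-- ===== VERDICT (by name: the statement is the Claim_ definition above) =====
theorem calculate_displacement_spec : Claim_equal_calculate_displacement := by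
  intro relationships _
  unfold Spec_calculate_displacement calculate_displacement calculate_displacement_alt calc_disp_net
  rw [calc_disp_foldl]
  simp [PySem.List.count]
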